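-- pv_equiv track=rewrite | github.com/Legend8583/southlake-health-2 | src/chat_assistant.py | _normalize_reply_text
-- ===== SOURCE A (Python) =====
-- def _normalize_reply_text(text: str) -> str:
--     lines: list[str] = []
--     for raw_line in (text or "").splitlines():
--         stripped = raw_line.strip()
--         if not stripped:
--             if lines and lines[-1] != "":
--                 lines.append("")
--             continue
--         if stripped.startswith("```"):
--             continue
--         if set(stripped) <= {"-", "_", "*"} and len(stripped) >= 3:
--             continue
--         if stripped.startswith("#"):
--             stripped = stripped.lstrip("#").strip(" :")
--             stripped = f"**{stripped}**"
--         lines.append(stripped)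
--     while lines and lines[-1] == "":
--         lines.pop()
--     return "\n".join(lines)
-- ===== SOURCE B (Python) =====
-- def _render_line(raw):
--     s = raw.strip()
--     if not s:
--         return ""
--     if s.startswith("```") or (len(s) >= 3 and all(c in "-_*" for c in s)):
--         return None
--     if s.startswith("#"):
--         return "**" + s.lstrip("#").strip(" :") + "**"
--     return s
--
--
-- def _normalize_reply_text(text: str) -> str:
--     items = [r for r in map(_render_line, (text or "").splitlines()) if r is not None]
--     kept = [s for prev, s in zip([None] + items, items) if s or prev]
--     return "\n".join(kept).rstrip("\n")
-- ===== Notes on version B (the rewrite author's own statement) =====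
-- stated objective: alternative
-- what changed: A's single stateful loop (append-with-blank-dedup into an accumulator plus a trailing pop-while loop) is replaced by a pipeline: map each line independently to skip/blank/content, filter out skipped lines, drop or collapse blanks with a zip-with-predecessor comprehension, and trim trailing blanks by rstrip'ping the joined string.
import Mathlib
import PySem

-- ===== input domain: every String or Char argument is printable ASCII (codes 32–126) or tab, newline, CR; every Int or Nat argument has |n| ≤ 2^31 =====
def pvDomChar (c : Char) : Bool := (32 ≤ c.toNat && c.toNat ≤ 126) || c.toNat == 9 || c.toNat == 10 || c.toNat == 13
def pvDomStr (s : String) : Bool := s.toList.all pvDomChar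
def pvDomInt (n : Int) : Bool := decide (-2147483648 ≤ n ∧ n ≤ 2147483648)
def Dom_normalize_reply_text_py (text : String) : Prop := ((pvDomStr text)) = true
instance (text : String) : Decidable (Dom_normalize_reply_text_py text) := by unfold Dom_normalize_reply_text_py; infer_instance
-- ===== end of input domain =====

-- B replaces A's single stateful accumulator loop by a map/filter/zip-with-predecessor pipeline plus an rstrip of the joined text (alternative decomposition, same cost; return value proved equal).

-- ===== PORT A =====
-- s.lstrip("#") and f"**{s}**", ported by hand (exact: lstrip("#") drops leading '#' characters; the f-string is concatenation)
def pvLstripHashA (s : String) : String := String.ofList (s.toList.dropWhile (fun c => c == '#'))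
def pvBoldA (s : String) : String := String.ofList ('*' :: '*' :: (s.toList ++ ['*', '*']))

-- the body of A's for-loop, as a fold step over the accumulator `lines`
def pvStepA (lines : List String) (raw : String) : List String :=
  let stripped := PySem.Str.strip raw
  if stripped = "" then
    if lines ≠ [] ∧ lines.getLast? ≠ some "" then lines ++ [""] else lines
  else if PySem.Str.startswith stripped "```" then lines
  else if (PySem.Set.ofList stripped.toList).issubset (PySem.Set.ofList ['-', '_', '*']) = true
          ∧ PySem.Str.len stripped ≥ 3 then lines
  else if PySem.Str.startswith stripped "#" then
    lines ++ [pvBoldA (PySem.Str.stripChars (pvLstripHashA stripped) " :")]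
  else lines ++ [stripped]

-- the trailing `while lines and lines[-1] == "": lines.pop()` loop
def pvTrimA (l : List String) : List String :=
  if h : l ≠ [] ∧ l.getLast? = some "" then pvTrimA l.dropLast else l
termination_by l.length
decreasing_by
  have : l.length ≠ 0 := fun hn => h.1 (List.eq_nil_of_length_eq_zero hn)
  simp [List.length_dropLast]; omega

def normalize_reply_text_py (text : String) : String :=
  let t := if text = "" then "" else text   -- (text or "")
  PySem.Str.join "\n" (pvTrimA ((PySem.Str.splitlines t).foldl pvStepA []))

-- ===== PORT B =====
-- _render_line of Source B
def pvRenderB (raw : String) : Option String :=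
  let s := PySem.Str.strip raw
  if s = "" then some ""
  else if PySem.Str.startswith s "```"
       || (decide (PySem.Str.len s ≥ 3) && s.toList.all (fun c => ['-', '_', '*'].contains c)) then none
  else if PySem.Str.startswith s "#" then
    some (String.ofList ('*' :: '*' ::
      ((PySem.Str.stripChars (String.ofList (s.toList.dropWhile (fun c => c == '#'))) " :").toList ++ ['*', '*'])))
  else some s

-- s.rstrip("\n"), ported by hand (exact: drops trailing '\n' characters)
def pvRstripNlB (s : String) : String :=
  String.ofList ((s.toList.reverse.dropWhile (fun c => c == '\n')).reverse)

def normalize_reply_text_py_alt (text : String) : String :=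
  let t := if text = "" then "" else text   -- (text or "")
  let items := ((PySem.Str.splitlines t).map pvRenderB).filterMap id
  let kept := (((none :: items.map some).zip items).filter
      (fun p => decide (p.2 ≠ "") || (match p.1 with | none => false | some q => decide (q ≠ "")))).map (·.2)
  pvRstripNlB (PySem.Str.join "\n" kept)

-- ===== PRECONDITION & SPEC =====
def Spec_normalize_reply_text_py (text : String) (out : String) : Prop := out = normalize_reply_text_py_alt text
instance (text : String) (out : String) : Decidable (Spec_normalize_reply_text_py text out) := by unfold Spec_normalize_reply_text_py; infer_instance

-- ===== CLAIM (what is proved, stated in full; the proofs are below) =====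
def Claim_equal_normalize_reply_text_py : Prop := ∀ (text : String), Dom_normalize_reply_text_py text → Spec_normalize_reply_text_py text (normalize_reply_text_py text)

-- ===== LEMMAS AND PROOFS =====

-- the blank-collapsing step of A's loop, over already-rendered items
def pvCStep (acc : List String) (s : String) : List String :=
  if s = "" then (if acc ≠ [] ∧ acc.getLast? ≠ some "" then acc ++ [""] else acc) else acc ++ [s]

def pvPrevTruthy : Option String → Bool
  | none => false
  | some q => decide (q ≠ "")

-- model of B's zip-with-predecessor pass
def pvKeptRec : Option String → List String → List String
  | _, [] => []
  | prev, s :: rest =>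
    (if decide (s ≠ "") || pvPrevTruthy prev then [s] else []) ++ pvKeptRec (some s) rest

theorem pvOfList_ne_empty (c : Char) (l : List Char) : String.ofList (c :: l) ≠ "" := by
  intro h
  have := congrArg String.toList h
  simp at this

theorem pvDash_eq (s : String) :
    (decide (PySem.Str.len s ≥ 3) && s.toList.all (fun c => ['-', '_', '*'].contains c))
    = decide ((PySem.Set.ofList s.toList).issubset (PySem.Set.ofList ['-', '_', '*']) = true
        ∧ PySem.Str.len s ≥ 3) := by
  have h1 : s.toList.all (fun c => ['-', '_', '*'].contains c)
      = (PySem.Set.ofList s.toList).issubset (PySem.Set.ofList ['-', '_', '*']) := by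
    rcases hb : (PySem.Set.ofList s.toList).issubset (PySem.Set.ofList ['-', '_', '*']) with _ | _
    · rw [List.all_eq_false]
      rw [← Bool.not_eq_true, PySem.Set.issubset_iff] at hb
      push_neg at hb
      obtain ⟨x, hx, hnx⟩ := hb
      exact ⟨x, (PySem.Set.mem_ofList _ _).mp hx, by
        simpa [List.contains_eq_mem] using fun hm => hnx ((PySem.Set.mem_ofList _ _).mpr hm)⟩
    · rw [List.all_eq_true]
      rw [PySem.Set.issubset_iff] at hb
      intro x hx
      simpa [List.contains_eq_mem] using
        (PySem.Set.mem_ofList _ _).mp (hb x ((PySem.Set.mem_ofList _ _).mpr hx))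
  rw [h1]
  cases hb : (PySem.Set.ofList s.toList).issubset (PySem.Set.ofList ['-', '_', '*']) <;> simp

theorem pvStepA_eq (lines : List String) (raw : String) :
    pvStepA lines raw = match pvRenderB raw with
      | none => lines
      | some s => pvCStep lines s := by
  unfold pvStepA pvRenderB
  set s := PySem.Str.strip raw with hs
  by_cases h0 : s = ""
  · rw [if_pos h0, if_pos h0]
    simp [pvCStep]
  · rw [if_neg h0, if_neg h0]
    by_cases h1 : PySem.Str.startswith s "```" = true
    · rw [if_pos h1, if_pos (show (PySem.Str.startswith s "```" || (decide (PySem.Str.len s ≥ 3) && s.toList.all fun c => ['-', '_', '*'].contains c)) = true by rw [h1, Bool.true_or])]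
    · rw [if_neg h1]
      have h1f : PySem.Str.startswith s "```" = false := Bool.eq_false_iff.mpr h1
      by_cases h2 : (PySem.Set.ofList s.toList).issubset (PySem.Set.ofList ['-', '_', '*']) = true
          ∧ PySem.Str.len s ≥ 3
      · have hd : (decide (PySem.Str.len s ≥ 3) && s.toList.all fun c => ['-', '_', '*'].contains c) = true := by
          rw [pvDash_eq]; exact decide_eq_true h2
        rw [if_pos h2, if_pos (show (PySem.Str.startswith s "```" || (decide (PySem.Str.len s ≥ 3) && s.toList.all fun c => ['-', '_', '*'].contains c)) = true by rw [hd, Bool.or_true])]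
      · have hd : (decide (PySem.Str.len s ≥ 3) && s.toList.all fun c => ['-', '_', '*'].contains c) = false := by
          rw [pvDash_eq]; exact decide_eq_false h2
        rw [if_neg h2, if_neg (show ¬ (PySem.Str.startswith s "```" || (decide (PySem.Str.len s ≥ 3) && s.toList.all fun c => ['-', '_', '*'].contains c)) = true by rw [h1f, hd]; decide)]
        by_cases h3 : PySem.Str.startswith s "#" = true
        · rw [if_pos h3, if_pos h3]
          show _ = pvCStep lines _
          rw [pvCStep]
          rw [if_neg (pvOfList_ne_empty _ _)]
          rfl
        · rw [if_neg h3, if_neg h3]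
          show _ = pvCStep lines s
          rw [pvCStep, if_neg h0]

theorem pvFold_eq (ls : List String) (acc : List String) :
    ls.foldl pvStepA acc = ((ls.map pvRenderB).filterMap id).foldl pvCStep acc := by
  induction ls generalizing acc with
  | nil => rfl
  | cons r ls ih =>
    rw [List.foldl_cons, List.map_cons, List.filterMap_cons]
    cases hb : pvRenderB r with
    | none =>
      rw [pvStepA_eq, hb]
      simpa using ih acc
    | some s =>
      rw [pvStepA_eq, hb]
      simpa using ih (pvCStep acc s)

theorem pvZip_eq (items : List String) (prev : Option String) :
    (((prev :: items.map some).zip items).filter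
      (fun p => decide (p.2 ≠ "") || (match p.1 with | none => false | some q => decide (q ≠ "")))).map (·.2)
    = pvKeptRec prev items := by
  induction items generalizing prev with
  | nil => simp [pvKeptRec]
  | cons s rest ih =>
    simp only [List.map_cons, List.zip_cons_cons, List.filter_cons, pvKeptRec]
    by_cases hs : s = ""
    · subst hs
      cases prev with
      | none => simp [pvPrevTruthy, ← ih (some "")]
      | some q =>
        by_cases hq : q = "" <;> simp [pvPrevTruthy, hq, ← ih (some "")]
    · cases prev with
      | none => simp [pvPrevTruthy, hs, ← ih (some s)]
      | some q => by_cases hq : q = "" <;> simp [pvPrevTruthy, hs, hq, ← ih (some s)]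

theorem pvKeptRec_subset (prev : Option String) (items : List String) :
    ∀ s ∈ pvKeptRec prev items, s ∈ items := by
  induction items generalizing prev with
  | nil => simp [pvKeptRec]
  | cons s rest ih =>
    intro x hx
    simp only [pvKeptRec, List.mem_append] at hx
    rcases hx with hx | hx
    · split at hx <;> simp_all
    · exact List.mem_cons_of_mem _ (ih (some s) x hx)

theorem pvFoldC_eq (items : List String) (acc : List String) (prev : Option String)
    (h : pvPrevTruthy prev = decide (acc ≠ [] ∧ acc.getLast? ≠ some "")) :
    items.foldl pvCStep acc = acc ++ pvKeptRec prev items := by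
  induction items generalizing acc prev with
  | nil => simp [pvKeptRec]
  | cons s rest ih =>
    simp only [List.foldl_cons, pvKeptRec, pvCStep]
    by_cases hs : s = ""
    · subst hs
      by_cases hc : acc ≠ [] ∧ acc.getLast? ≠ some ""
      · have ht : pvPrevTruthy prev = true := by rw [h]; simp [hc]
        rw [if_pos rfl, if_pos hc, ht, Bool.or_true, if_pos rfl,
          ih (acc ++ [""]) (some "")]
        · simp
        · simp [pvPrevTruthy]
      · have ht : pvPrevTruthy prev = false := by rw [h]; simpa using hc
        rw [if_pos rfl, if_neg hc, ht, Bool.or_false,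
          if_neg (by simp : ¬ (decide (("" : String) ≠ "") = true)),
          ih acc (some "")]
        · simp
        · simp [pvPrevTruthy]; tauto
    · have h1 : decide (s ≠ "") = true := by simp [hs]
      rw [if_neg hs, h1, Bool.true_or, if_pos rfl, ih (acc ++ [s]) (some s)]
      · simp
      · simp [pvPrevTruthy, hs]

theorem pvTrimA_eq (l : List String) :
    pvTrimA l = (l.reverse.dropWhile (fun s => s == "")).reverse := by
  fun_induction pvTrimA l with
  | case1 l h ih =>
    rw [ih]
    congr 1
    have h2 : l.reverse.head? = some "" := by rw [List.head?_reverse]; exact h.2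
    cases hr : l.reverse with
    | nil => simp [hr] at h2
    | cons a as =>
      rw [hr] at h2; simp at h2; subst h2
      have : l.dropLast.reverse = as := by
        have := congrArg List.tail hr
        simpa [List.tail_reverse] using this
      rw [this, List.dropWhile_cons_of_pos (by simp)]
  | case2 l h =>
    by_cases hl : l = []
    · simp [hl]
    · have h2 : l.getLast? ≠ some "" := by tauto
      cases hr : l.reverse with
      | nil => simp_all
      | cons a as =>
        have ha : a ≠ "" := by
          have : l.reverse.head? = l.getLast? := (List.head?_reverse (l := l))
          rw [hr] at this; simp at this; rw [← this] at h2; simpa using fun hh => h2 (by rw [hh])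
        rw [List.dropWhile_cons_of_neg (by simpa using ha)]
        rw [← hr, List.reverse_reverse]

theorem pvJoin_snoc (sep : List Char) (xs : List (List Char)) (y : List Char) :
    PySem.Chars.join sep (xs ++ [y]) = if xs = [] then y else PySem.Chars.join sep xs ++ sep ++ y := by
  induction xs with
  | nil => simp [PySem.Chars.join_singleton]
  | cons x xs ih =>
    cases xs with
    | nil => simp [PySem.Chars.join_cons_cons, PySem.Chars.join_singleton]
    | cons b r =>
      rw [List.cons_append, List.cons_append, PySem.Chars.join_cons_cons]
      rw [← List.cons_append, ih]
      simp [PySem.Chars.join_cons_cons]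

theorem pvHead_dropWhile {α : Type} (p : α → Bool) (l : List α) (a : α)
    (h : (l.dropWhile p).head? = some a) : p a = false := by
  induction l with
  | nil => simp [List.dropWhile] at h
  | cons x xs ih =>
    rw [List.dropWhile_cons] at h
    split at h
    · exact ih h
    · simp at h; subst h; simp_all

theorem pvStrip_no_nl (cs : List Char) : (PySem.Chars.strip cs).getLast? ≠ some '\n' := by
  unfold PySem.Chars.strip PySem.Chars.rstrip
  intro h
  rw [List.getLast?_reverse] at h
  have := pvHead_dropWhile _ _ _ h
  simp [PySem.Chars.isspace] at this

theorem pvRenderB_no_nl (raw s : String) (h : pvRenderB raw = some s) (hs : s ≠ "") :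
    s.toList.getLast? ≠ some '\n' := by
  unfold pvRenderB at h
  dsimp only at h
  split at h
  · exact absurd (Option.some.inj h).symm hs
  · split at h
    · exact absurd h (by simp)
    · split at h
      · rw [← Option.some.inj h]
        rw [String.toList_ofList]
        intro hcon
        have : ('*' :: '*' :: ((PySem.Str.stripChars (String.ofList ((PySem.Str.strip raw).toList.dropWhile (fun c => c == '#'))) " :").toList ++ ['*', '*'])) = (('*' :: '*' :: ((PySem.Str.stripChars (String.ofList ((PySem.Str.strip raw).toList.dropWhile (fun c => c == '#'))) " :").toList ++ ['*'])) ++ ['*']) := by simp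
        rw [this, List.getLast?_concat] at hcon
        simp at hcon
      · rw [← Option.some.inj h, PySem.Str.toList_strip]
        exact pvStrip_no_nl _

theorem pvJoin_trim (L : List String)
    (hL : ∀ s ∈ L, s ≠ "" → s.toList.getLast? ≠ some '\n') :
    PySem.Str.join "\n" (pvTrimA L) = pvRstripNlB (PySem.Str.join "\n" L) := by
  apply String.toList_inj.mp
  rw [pvTrimA_eq]
  simp only [pvRstripNlB, PySem.Str.toList_join, String.toList_ofList]
  induction L using List.reverseRecOn with
  | nil => simp [PySem.Chars.join_nil]
  | append_singleton M a ih =>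
    have hM : ∀ s ∈ M, s ≠ "" → s.toList.getLast? ≠ some '\n' := by
      intro s hs; exact hL s (by simp [hs])
    by_cases ha : a = ""
    · subst ha
      rw [List.reverse_append]
      simp only [List.reverse_singleton, List.singleton_append]
      rw [List.dropWhile_cons_of_pos (by decide)]
      rw [ih hM]
      congr 1
      rw [List.map_append]
      simp only [List.map_cons, List.map_nil]
      rw [pvJoin_snoc]
      by_cases hMn : M.map String.toList = []
      · simp [hMn, PySem.Chars.join_nil]
      · rw [if_neg hMn]
        have he : "".toList = ([] : List Char) := rfl
        rw [he, List.append_nil, List.reverse_append]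
        have hn : ("\n".toList : List Char) = ['\n'] := rfl
        rw [hn]
        simp [List.dropWhile_cons_of_pos]
    · -- a ≠ "": trim keeps everything; rstrip removes nothing
      rw [List.reverse_append]
      simp only [List.reverse_singleton, List.singleton_append]
      rw [List.dropWhile_cons_of_neg (by simpa using ha)]
      rw [List.reverse_cons, List.reverse_reverse]
      have h1 : a.toList ≠ [] := fun hh => ha (String.toList_inj.mp hh)
      have h2 := hL a (by simp) ha
      have hlast : (PySem.Chars.join "\n".toList ((M ++ [a]).map String.toList)).getLast? ≠ some '\n' := by
        rw [List.map_append, List.map_cons, List.map_nil, pvJoin_snoc]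
        split
        · exact h2
        · rw [List.append_assoc, List.getLast?_append, List.getLast?_append]
          cases hgg : a.toList.getLast? with
          | none => exact absurd (List.getLast?_eq_none_iff.mp hgg) h1
          | some d => rw [hgg] at h2; simpa [hgg] using h2
      have hh : (PySem.Chars.join "\n".toList ((M ++ [a]).map String.toList)).reverse.head? ≠ some '\n' := by
        rw [List.head?_reverse]; exact hlast
      cases hr : (PySem.Chars.join "\n".toList ((M ++ [a]).map String.toList)).reverse with
      | nil =>
        have hj : PySem.Chars.join "\n".toList ((M ++ [a]).map String.toList) = [] := by
          simpa using congrArg List.reverse hr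
        simpa using hj
      | cons c cs =>
        have hc : c ≠ '\n' := by
          intro hcc; apply hh; rw [hr, hcc]; rfl
        rw [List.dropWhile_cons_of_neg (by simpa using hc)]
        rw [← hr]
        rw [List.reverse_reverse]

-- ===== VERDICT (by name: the statement is the Claim_ definition above) =====
theorem normalize_reply_text_py_spec : Claim_equal_normalize_reply_text_py := by
  intro text _
  unfold Spec_normalize_reply_text_py normalize_reply_text_py normalize_reply_text_py_alt
  dsimp only
  rw [pvFold_eq]
  rw [pvFoldC_eq _ [] none (by simp [pvPrevTruthy])]
  rw [pvZip_eq]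
  rw [List.nil_append]
  set items := (((PySem.Str.splitlines (if text = "" then "" else text)).map pvRenderB).filterMap id) with hitems
  apply pvJoin_trim
  intro s hsmem hsne
  have hin : s ∈ items := pvKeptRec_subset none items s hsmem
  rw [hitems, List.mem_filterMap] at hin
  obtain ⟨o, ho, hid⟩ := hin
  rw [List.mem_map] at ho
  obtain ⟨raw, _, hraw⟩ := ho
  cases o with
  | none => simp at hid
  | some v =>
    have hv : v = s := by simpa using hid
    subst hv
    exact pvRenderB_no_nl raw _ hraw hsne
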